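-- pv_equiv track=rewrite | github.com/sproutsai-engg/coding_question_generator | json_files/python_codes/Q_1099.py | max_sum_under_k
-- ===== SOURCE A (Python) =====
-- def max_sum_under_k(nums, k):
--     max_sum = -1
--     for i in range(len(nums)):
--         for j in range(i + 1, len(nums)):
--             _sum = nums[i] + nums[j]
--             if _sum < k and _sum > max_sum:
--                 max_sum = _sum
--     return max_sum
-- ===== SOURCE B (Python) =====
-- def max_sum_under_k(nums, k):
--     a = sorted(nums)
--     best = -1
--     lo, hi = 0, len(a) - 1
--     while lo < hi:
--         s = a[lo] + a[hi]
--         if s < k: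
--             if s > best:
--                 best = s
--             lo += 1
--         else:
--             hi -= 1
--     return best
-- ===== Notes on version B (the rewrite author's own statement) =====
-- stated objective: faster
-- what changed: Replaced the quadratic scan over all index pairs by sort-then-two-pointer: sort nums, move lo up when the pair sum fits under k (recording it) and hi down otherwise.
import Mathlib
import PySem

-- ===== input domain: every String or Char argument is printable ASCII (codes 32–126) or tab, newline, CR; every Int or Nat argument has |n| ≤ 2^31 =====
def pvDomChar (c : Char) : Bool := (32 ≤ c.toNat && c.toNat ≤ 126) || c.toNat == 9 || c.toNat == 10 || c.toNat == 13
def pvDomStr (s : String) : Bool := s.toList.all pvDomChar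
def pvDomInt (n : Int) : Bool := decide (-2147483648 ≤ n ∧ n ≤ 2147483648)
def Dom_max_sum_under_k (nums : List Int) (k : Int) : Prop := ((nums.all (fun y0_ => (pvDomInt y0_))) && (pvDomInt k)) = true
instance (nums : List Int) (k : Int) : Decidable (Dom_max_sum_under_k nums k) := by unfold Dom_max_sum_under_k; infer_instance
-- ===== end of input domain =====

-- B replaces A's O(n^2) scan of all index pairs by sort-then-two-pointer (objective: faster).

-- ===== PORT A =====
-- inner loop 'for j in range(i+1, len(nums))': nums[j] runs over the elements after nums[i]
def pvAInner (k x : Int) : List Int → Int → Int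
  | [], ms => ms
  | y :: ys, ms => pvAInner k x ys (if x + y < k ∧ x + y > ms then x + y else ms)

-- outer loop 'for i in range(len(nums))': nums[i] runs over nums, the j-loop over its tail
def pvAOuter (k : Int) : List Int → Int → Int
  | [], ms => ms
  | x :: xs, ms => pvAOuter k xs (pvAInner k x xs ms)

def max_sum_under_k (nums : List Int) (k : Int) : Int := pvAOuter k nums (-1)

-- ===== PORT B =====
-- 'while lo < hi:' of Source B; terminates because hi - lo shrinks
def pvTwoPtr (a : List Int) (k : Int) (lo hi best : Int) : Int :=
  if _h : lo < hi then
    let s := PySem.List.pyGetD a lo 0 + PySem.List.pyGetD a hi 0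
    if s < k then pvTwoPtr a k (lo + 1) hi (if s > best then s else best)
    else pvTwoPtr a k lo (hi - 1) best
  else best
termination_by (hi - lo).toNat
decreasing_by all_goals omega

def max_sum_under_k_alt (nums : List Int) (k : Int) : Int :=
  let a := PySem.List.sorted nums (fun x => x) false
  pvTwoPtr a k 0 (PySem.List.len a - 1) (-1)

-- ===== PRECONDITION & SPEC =====
def Spec_max_sum_under_k (nums : List Int) (k : Int) (out : Int) : Prop := out = max_sum_under_k_alt nums k
instance (nums : List Int) (k : Int) (out : Int) : Decidable (Spec_max_sum_under_k nums k out) := by unfold Spec_max_sum_under_k; infer_instance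

-- ===== CLAIM (what is proved, stated in full; the proofs are below) =====
def Claim_equal_max_sum_under_k : Prop := ∀ (nums : List Int) (k : Int), Dom_max_sum_under_k nums k → Spec_max_sum_under_k nums k (max_sum_under_k nums k)

-- ===== LEMMAS AND PROOFS =====

-- the accumulator update both programs perform on one candidate pair sum
def pvStep (k ms s : Int) : Int := if s < k then max ms s else ms

-- all pair sums nums[i] + nums[j], i < j, in A's traversal order
def pvPairSums : List Int → List Int
  | [] => []
  | x :: xs => xs.map (fun y => x + y) ++ pvPairSums xs

theorem pvStep_rcomm (k b s t : Int) : pvStep k (pvStep k b s) t = pvStep k (pvStep k b t) s := by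
  unfold pvStep; split_ifs <;> omega

theorem pvAInner_eq (k x : Int) (ys : List Int) : ∀ ms,
    pvAInner k x ys ms = (ys.map (fun y => x + y)).foldl (pvStep k) ms := by
  induction ys with
  | nil => intro ms; rfl
  | cons y ys ih =>
    intro ms
    show pvAInner k x ys _ = List.foldl (pvStep k) (pvStep k ms (x + y)) _
    rw [ih]
    have : (if x + y < k ∧ x + y > ms then x + y else ms) = pvStep k ms (x + y) := by
      simp only [pvStep]; split_ifs <;> omega
    rw [this]

theorem pvAOuter_eq (k : Int) (l : List Int) : ∀ ms,
    pvAOuter k l ms = (pvPairSums l).foldl (pvStep k) ms := by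
  induction l with
  | nil => intro ms; rfl
  | cons x xs ih =>
    intro ms
    show pvAOuter k xs _ = _
    rw [ih, pvAInner_eq, pvPairSums, List.foldl_append]

theorem pvPairSums_append_singleton (l : List Int) (z : Int) :
    (pvPairSums (l ++ [z])).Perm (pvPairSums l ++ l.map (fun y => y + z)) := by
  induction l with
  | nil => exact List.Perm.refl []
  | cons x l ih =>
    rw [← Multiset.coe_eq_coe] at ih ⊢
    show (((l ++ [z]).map (fun y => x + y) ++ pvPairSums (l ++ [z]) : List Int) : Multiset Int) = _
    simp only [pvPairSums, List.map_append, List.map_cons, List.map_nil, ← Multiset.coe_add,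
      ← Multiset.cons_coe, ← Multiset.singleton_add] at ih ⊢
    rw [ih]
    abel

theorem pvPairSums_perm {l₁ l₂ : List Int} (h : l₁.Perm l₂) :
    (pvPairSums l₁).Perm (pvPairSums l₂) := by
  induction h with
  | nil => exact List.Perm.refl _
  | cons x h ih => exact List.Perm.append (List.Perm.map _ h) ih
  | swap x y l =>
    rw [← Multiset.coe_eq_coe]
    show (((x :: l).map (fun a => y + a) ++ pvPairSums (x :: l) : List Int) : Multiset Int)
        = (((y :: l).map (fun a => x + a) ++ pvPairSums (y :: l) : List Int) : Multiset Int)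
    simp only [pvPairSums, List.map_cons, ← Multiset.coe_add, ← Multiset.cons_coe,
      ← Multiset.singleton_add]
    rw [show (y + x : Int) = x + y from add_comm y x]
    abel
  | trans _ _ ih₁ ih₂ => exact ih₁.trans ih₂

-- the fold ignores every candidate that is ≥ k
theorem pvFoldl_step_ge (k : Int) (l : List Int) (h : ∀ s ∈ l, ¬ s < k) : ∀ b,
    l.foldl (pvStep k) b = b := by
  induction l with
  | nil => intro b; rfl
  | cons s l ih =>
    intro b
    simp only [List.foldl_cons, pvStep, if_neg (h s (by simp))]
    exact ih (fun t ht => h t (by simp [ht])) b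

-- over candidates that are all < k the fold is a running max
theorem pvFoldl_step_all_lt (k : Int) (l : List Int) (h : ∀ s ∈ l, s < k) : ∀ b,
    l.foldl (pvStep k) b = l.foldl max b := by
  induction l with
  | nil => intro b; rfl
  | cons s l ih =>
    intro b
    simp only [List.foldl_cons, pvStep, if_pos (h s (by simp))]
    exact ih (fun t ht => h t (by simp [ht])) _

-- so on such candidates it returns max b m for the largest member m
theorem pvFoldl_step_lt (k : Int) (l : List Int) (m : Int) (hm : m ∈ l)
    (hmax : ∀ s ∈ l, s ≤ m) (hlt : ∀ s ∈ l, s < k) (b : Int) :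
    l.foldl (pvStep k) b = max b m := by
  rw [pvFoldl_step_all_lt k l hlt b]
  obtain ⟨hb, hall⟩ := PySem.List.le_foldl_max l b
  have hmem := PySem.List.foldl_max_mem l b
  have h1 : m ≤ l.foldl max b := hall m hm
  have h2 : l.foldl max b ≤ max b m := by
    rcases hmem with h | h
    · omega
    · have := hmax _ h; omega
  omega

-- sorted segments: every element of a[lo..hi] is between a[lo] and a[hi]
theorem pvSeg_mem (a : List Int) (lo n : Nat) (y : Int)
    (hy : y ∈ (a.drop lo).take n) :
    ∃ i, ∃ h : i < n ∧ lo + i < a.length, y = a[lo + i]'h.2 := by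
  obtain ⟨i, hi, hget⟩ := List.mem_iff_getElem.mp hy
  have hlen : i < n ∧ lo + i < a.length := by
    have := hi
    simp only [List.length_take, List.length_drop, lt_min_iff] at this
    omega
  refine ⟨i, hlen, ?_⟩
  rw [← hget, List.getElem_take, List.getElem_drop]

theorem pvSorted_getElem_le (a : List Int) (hs : a.Pairwise (· ≤ ·)) (i j : Nat)
    (hij : i ≤ j) (hj : j < a.length) : a[i]'(by omega) ≤ a[j] := by
  rcases Nat.lt_or_ge i j with h | h
  · exact List.pairwise_iff_getElem.mp hs i j (by omega) hj h
  · have : i = j := by omega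
    subst this; exact le_refl _

-- the two-pointer loop on a sorted list computes the fold of pvStep over all pair sums of the segment a[lo..hi]
theorem pvTwoPtr_eq (a : List Int) (hs : a.Pairwise (· ≤ ·)) (k : Int) :
    ∀ n (lo hi : Nat) (best : Int), hi - lo ≤ n → lo ≤ hi → hi < a.length →
    pvTwoPtr a k lo hi best
      = (pvPairSums ((a.drop lo).take (hi + 1 - lo))).foldl (pvStep k) best := by
  intro n
  induction n with
  | zero =>
    intro lo hi best hn hle hlen
    have hEq : lo = hi := by omega
    subst hEq
    rw [pvTwoPtr, dif_neg (by omega)]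
    rw [show lo + 1 - lo = 1 from by omega]
    rw [List.drop_eq_getElem_cons hlen, List.take_succ_cons, List.take_zero]
    simp [pvPairSums]
  | succ n ih =>
    intro lo hi best hn hle hlen
    rcases Nat.eq_or_lt_of_le hle with hEq | hlt
    · subst hEq
      rw [pvTwoPtr, dif_neg (by omega)]
      rw [show lo + 1 - lo = 1 from by omega]
      rw [List.drop_eq_getElem_cons hlen, List.take_succ_cons, List.take_zero]
      simp [pvPairSums]
    · have hlo : lo < a.length := by omega
      rw [pvTwoPtr, dif_pos (by exact_mod_cast Int.ofNat_lt.mpr hlt)]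
      simp only [PySem.List.pyGetD_natCast, List.getD_eq_getElem a 0 hlo,
        List.getD_eq_getElem a 0 hlen]
      -- the segment a[lo..hi] as cons and as append
      have hseg_cons : (a.drop lo).take (hi + 1 - lo)
          = a[lo] :: (a.drop (lo + 1)).take (hi - lo) := by
        rw [List.drop_eq_getElem_cons hlo, show hi + 1 - lo = (hi - lo) + 1 from by omega,
          List.take_succ_cons]
      have hseg_app : (a.drop lo).take (hi + 1 - lo)
          = (a.drop lo).take (hi - lo) ++ [a[hi]] := by
        rw [show hi + 1 - lo = (hi - lo) + 1 from by omega, List.take_add_one,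
          List.getElem?_drop, show lo + (hi - lo) = hi from by omega,
          List.getElem?_eq_getElem hlen]
        rfl
      by_cases hsk : a[lo] + a[hi] < k
      · rw [if_pos hsk]
        rw [show ((lo : Int) + 1) = ((lo + 1 : Nat) : Int) from by push_cast; ring]
        rw [ih (lo + 1) hi _ (by omega) (by omega) hlen,
          show hi + 1 - (lo + 1) = hi - lo from by omega]
        rw [hseg_cons]
        show _ = List.foldl (pvStep k)
          best (((a.drop (lo+1)).take (hi - lo)).map (fun y => a[lo] + y) ++ _)
        rw [List.foldl_append]
        congr 1
        have hmem : a[lo] + a[hi] ∈ ((a.drop (lo+1)).take (hi - lo)).map (fun y => a[lo] + y) := by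
          apply List.mem_map.mpr
          refine ⟨a[hi], ?_, rfl⟩
          apply List.mem_iff_getElem.mpr
          have hl1 : hi - lo - 1 < ((a.drop (lo+1)).take (hi - lo)).length := by
            simp only [List.length_take, List.length_drop]; omega
          refine ⟨hi - lo - 1, hl1, ?_⟩
          rw [List.getElem_take, List.getElem_drop]
          congr 1
          omega
        have hbound : ∀ s ∈ ((a.drop (lo+1)).take (hi - lo)).map (fun y => a[lo] + y),
            s ≤ a[lo] + a[hi] := by
          intro s hsm
          obtain ⟨y, hy, rfl⟩ := List.mem_map.mp hsm
          obtain ⟨i, ⟨hi1, hi2⟩, rfl⟩ := pvSeg_mem a (lo + 1) (hi - lo) y hy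
          have := pvSorted_getElem_le a hs (lo + 1 + i) hi (by omega) hlen
          omega
        rw [pvFoldl_step_lt k _ (a[lo] + a[hi]) hmem hbound
          (fun s hsm => by have := hbound s hsm; omega) best]
        omega
      · rw [if_neg hsk]
        rw [show ((hi : Int) - 1) = ((hi - 1 : Nat) : Int) from by push_cast [Nat.cast_sub (by omega : 1 ≤ hi)]; ring]
        rw [ih lo (hi - 1) best (by omega) (by omega) (by omega)]
        rw [hseg_app, show hi - 1 + 1 - lo = hi - lo from by omega]
        rw [(pvPairSums_append_singleton ((a.drop lo).take (hi - lo)) a[hi]).foldl_eq'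
          (fun x _ y _ z => pvStep_rcomm k z x y) best]
        rw [List.foldl_append]
        refine (pvFoldl_step_ge k _ ?_ _).symm
        intro s hsm
        obtain ⟨y, hy, rfl⟩ := List.mem_map.mp hsm
        obtain ⟨i, ⟨hi1, hi2⟩, rfl⟩ := pvSeg_mem a lo (hi - lo) y hy
        have := pvSorted_getElem_le a hs lo (lo + i) (by omega) (by omega)
        omega

theorem pvB_eq (nums : List Int) (k : Int) :
    max_sum_under_k_alt nums k
      = (pvPairSums (PySem.List.sorted nums (fun x => x) false)).foldl (pvStep k) (-1) := by
  show pvTwoPtr _ k 0 _ (-1) = _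
  rw [PySem.List.len_eq, show (0 : Int) = ((0 : Nat) : Int) from by norm_num]
  rcases Nat.eq_zero_or_pos (PySem.List.sorted nums (fun x => x) false).length with h0 | hpos
  · rw [List.length_eq_zero_iff] at h0
    rw [h0]
    rw [pvTwoPtr, dif_neg (by norm_num)]
    rfl
  · rw [show ((((PySem.List.sorted nums (fun x => x) false).length : Int)) - 1)
        = (((PySem.List.sorted nums (fun x => x) false).length - 1 : Nat) : Int) from by
      push_cast [Nat.cast_sub hpos]; ring]
    rw [pvTwoPtr_eq _ (PySem.List.sorted_pairwise nums (fun x => x)) k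
      ((PySem.List.sorted nums (fun x => x) false).length - 1) 0 _ (-1) (by omega) (by omega)
      (by omega)]
    rw [List.drop_zero, show (PySem.List.sorted nums (fun x => x) false).length - 1 + 1 - 0
        = (PySem.List.sorted nums (fun x => x) false).length from by omega,
      List.take_of_length_le (le_refl _)]

-- ===== VERDICT (by name: the statement is the Claim_ definition above) =====
theorem max_sum_under_k_spec : Claim_equal_max_sum_under_k := by
  intro nums k _
  unfold Spec_max_sum_under_k
  rw [pvB_eq]
  show pvAOuter k nums (-1) = _
  rw [pvAOuter_eq]
  exact ((pvPairSums_perm (PySem.List.sorted_perm nums (fun x => x) false)).symm).foldl_eq'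
    (fun x _ y _ z => pvStep_rcomm k z x y) (-1)
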